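-- pv_equiv track=rewrite | github.com/cirosantilli/project-euler-solutions | solvers/776.py | sum_by_digit_sum_upto
-- ===== SOURCE A (Python) =====
-- from typing import List
--
-- def sum_by_digit_sum_upto(n: int) -> List[int]:
--     """
--     Return an array S where S[s] = sum of all integers x in [0, n] such that
--     digit_sum(x) == s.
--
--     Uses a digit DP over the decimal representation of n, allowing leading zeros
--     so that all shorter numbers are included naturally.
--     """
--     if n < 0:
--         raise ValueError("n must be non-negative")
--
--     digits = list(map(int, str(n)))
--     L = len(digits)
--     max_sum = 9 * L
--
--     # dp_*_tight: prefixes equal to n so far; dp_*_loose: already smaller.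
--     cnt_tight = [0] * (max_sum + 1)
--     sum_tight = [0] * (max_sum + 1)
--     cnt_tight[0] = 1
--
--     cnt_loose = [0] * (max_sum + 1)
--     sum_loose = [0] * (max_sum + 1)
--
--     for lim in digits:
--         ncnt_tight = [0] * (max_sum + 1)
--         nsum_tight = [0] * (max_sum + 1)
--         ncnt_loose = [0] * (max_sum + 1)
--         nsum_loose = [0] * (max_sum + 1)
--
--         # Transition from loose states (next digit can be 0..9).
--         for s, c in enumerate(cnt_loose):
--             if not c:
--                 continue
--             v10 = sum_loose[s] * 10
--             for d in range(10):
--                 ns = s + d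
--                 ncnt_loose[ns] += c
--                 nsum_loose[ns] += v10 + c * d
--
--         # Transition from tight states (next digit restricted by lim).
--         for s, c in enumerate(cnt_tight):
--             if not c:
--                 continue
--             v10 = sum_tight[s] * 10
--             for d in range(lim + 1):
--                 ns = s + d
--                 if d == lim:
--                     ncnt_tight[ns] += c
--                     nsum_tight[ns] += v10 + c * d
--                 else:
--                     ncnt_loose[ns] += c
--                     nsum_loose[ns] += v10 + c * d
--
--         cnt_tight, sum_tight = ncnt_tight, nsum_tight
--         cnt_loose, sum_loose = ncnt_loose, nsum_loose
--
--     return [sum_tight[s] + sum_loose[s] for s in range(max_sum + 1)]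
-- ===== SOURCE B (Python) =====
-- from typing import List
--
-- def sum_by_digit_sum_upto(n: int) -> List[int]:
--     """
--     Return an array S where S[s] = sum of all integers x in [0, n] such that
--     digit_sum(x) == s.
--
--     Recursive decomposition by the LAST digit: writing x = 10*q + d, the
--     numbers below t are the q below t//10 with any last digit, plus the
--     boundary block q == t//10, d < t % 10.  One count/sum table pair per
--     recursion level, t -> t//10, down to 0.
--     """
--     if n < 0:
--         raise ValueError("n must be non-negative")
--     M = 9 * len(str(n)) + 1
--
--     def digit_sum(y: int) -> int:
--         ds = 0
--         while y:
--             ds += y % 10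
--             y //= 10
--         return ds
--
--     def tables(t: int):
--         # counts and sums of x in [0, t), grouped by digit sum
--         if t == 0:
--             return [0] * M, [0] * M
--         u, r = divmod(t, 10)
--         cu, tu = tables(u)
--         c, tt = [0] * M, [0] * M
--         for s in range(M):
--             if cu[s]:
--                 for d in range(10):
--                     c[s + d] += cu[s]
--                     tt[s + d] += 10 * tu[s] + d * cu[s]
--         du = digit_sum(u)
--         for d in range(r):
--             c[du + d] += 1
--             tt[du + d] += 10 * u + d
--         return c, tt
--
--     return tables(n + 1)[1]
-- ===== Notes on version B (the rewrite author's own statement) =====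
-- stated objective: alternative
-- what changed: Replaced A's most-significant-digit tight/loose DP over the digits of n by a last-digit recursive decomposition: count/sum tables for [0, t) are computed from the tables for [0, t//10) (x = 10*q + d) plus an explicit boundary block, recursing t -> t//10 down to 0; the n<0 ValueError guard is kept.
import Mathlib
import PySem

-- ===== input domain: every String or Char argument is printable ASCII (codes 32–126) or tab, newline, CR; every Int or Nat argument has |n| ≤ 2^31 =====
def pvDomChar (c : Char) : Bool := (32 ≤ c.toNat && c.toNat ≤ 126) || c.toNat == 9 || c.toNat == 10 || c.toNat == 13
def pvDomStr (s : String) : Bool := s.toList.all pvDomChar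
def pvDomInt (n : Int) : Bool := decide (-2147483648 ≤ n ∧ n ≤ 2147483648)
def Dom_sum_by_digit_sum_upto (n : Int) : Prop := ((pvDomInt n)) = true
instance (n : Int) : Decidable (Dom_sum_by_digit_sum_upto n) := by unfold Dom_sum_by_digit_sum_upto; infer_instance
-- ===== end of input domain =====

-- B replaces A's most-significant-digit tight/loose DP by a last-digit recursive decomposition
-- (x = 10*q + d, tables for [0, t) via t -> t//10); both raise ValueError on n < 0 (excluded by Pre_).

-- ===== PORT A =====

/-- `int(c)` on a single character, as in Python's `map(int, str(n))`
    (exact on the digit characters `str(n)` produces for `n ≥ 0`, where `int(c)` never raises). -/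
def pvDigitInt (c : Char) : Int := (PySem.Int.ofChars? [c]).getD 0

/-- Python's `arr[i] += v`; every index used by either port is nonnegative and in range,
    where this is exact. -/
def pvAddAt (xs : List Int) (i : Nat) (v : Int) : List Int := xs.set i (xs.getD i 0 + v)

/-- DP state: `((cnt_tight, sum_tight), (cnt_loose, sum_loose))`. -/
abbrev pvQuad := (List Int × List Int) × (List Int × List Int)

/-- Body of A's loop `for s, c in enumerate(cnt_loose): …` (`sl` = `sum_loose`). -/
def pvLooseStep (sl : List Int) (p : List Int × List Int) (sc : Int × Int) : List Int × List Int :=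
  if sc.2 = 0 then p else
    let v10 := PySem.List.pyGetD sl sc.1 0 * 10
    (PySem.List.pyRange 0 10 1).foldl (fun q d =>
        (pvAddAt q.1 (sc.1 + d).toNat sc.2,
         pvAddAt q.2 (sc.1 + d).toNat (v10 + sc.2 * d))) p

/-- Body of A's loop `for s, c in enumerate(cnt_tight): …` (`stt` = `sum_tight`). -/
def pvTightStep (stt : List Int) (lim : Int) (q : pvQuad) (sc : Int × Int) : pvQuad :=
  if sc.2 = 0 then q else
    let v10 := PySem.List.pyGetD stt sc.1 0 * 10
    (PySem.List.pyRange 0 (lim + 1) 1).foldl (fun r d =>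
        if d = lim then
          ((pvAddAt r.1.1 (sc.1 + d).toNat sc.2,
            pvAddAt r.1.2 (sc.1 + d).toNat (v10 + sc.2 * d)), r.2)
        else
          (r.1, (pvAddAt r.2.1 (sc.1 + d).toNat sc.2,
                 pvAddAt r.2.2 (sc.1 + d).toNat (v10 + sc.2 * d)))) q

/-- Body of A's loop `for lim in digits: …` (`zero` = `[0] * (max_sum + 1)`). -/
def pvDigitStep (zero : List Int) (st : pvQuad) (lim : Int) : pvQuad :=
  let loose := (PySem.List.enumerate st.2.1).foldl (pvLooseStep st.2.2) (zero, zero)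
  (PySem.List.enumerate st.1.1).foldl (pvTightStep st.1.2 lim) ((zero, zero), loose)

def sum_by_digit_sum_upto (n : Int) : List Int :=
  -- `if n < 0: raise ValueError(...)`: those inputs are excluded by Pre_sum_by_digit_sum_upto
  let digits : List Int := (PySem.Int.toChars n).map pvDigitInt
  let maxSum : Nat := 9 * digits.length
  let zero : List Int := List.replicate (maxSum + 1) 0
  let final := digits.foldl (pvDigitStep zero) ((zero.set 0 1, zero), (zero, zero))
  (PySem.List.pyRange 0 ((maxSum : Int) + 1) 1).map (fun s =>
    PySem.List.pyGetD final.1.2 s 0 + PySem.List.pyGetD final.2.2 s 0)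

-- ===== PORT B =====

/-- The `ds, y = 0, x; while y: ds += y % 10; y //= 10` digit-sum helper of B
    (`y` stays nonnegative, so `Nat` recursion is exact). -/
def pvDigitSum (y : Nat) : Nat :=
  if y = 0 then 0 else y % 10 + pvDigitSum (y / 10)

/-- B's recursive `tables(t)`: counts and sums of `x` in `[0, t)` grouped by digit sum
    (`t` stays nonnegative, so `Nat` recursion is exact; `u, r = divmod(t, 10)`). -/
def pvTables (M : Nat) (t : Nat) : List Int × List Int :=
  if _h : t = 0 then (List.replicate M 0, List.replicate M 0)
  else
    let u := t / 10
    let r := t % 10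
    let cu_tu := pvTables M u
    let q := (List.range M).foldl (fun (q : List Int × List Int) s =>
        if cu_tu.1.getD s 0 = 0 then q else
          (List.range 10).foldl (fun (q2 : List Int × List Int) d =>
              (pvAddAt q2.1 (s + d) (cu_tu.1.getD s 0),
               pvAddAt q2.2 (s + d) (10 * cu_tu.2.getD s 0 + (d : Int) * cu_tu.1.getD s 0))) q)
      (List.replicate M 0, List.replicate M 0)
    let du := pvDigitSum u
    (List.range r).foldl (fun (q3 : List Int × List Int) d =>
        (pvAddAt q3.1 (du + d) 1,
         pvAddAt q3.2 (du + d) (10 * (u : Int) + (d : Int)))) q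
decreasing_by exact Nat.div_lt_self (by omega) (by omega)

def sum_by_digit_sum_upto_alt (n : Int) : List Int :=
  -- `if n < 0: raise ValueError(...)`: those inputs are excluded by Pre_sum_by_digit_sum_upto
  let M := (9 * PySem.Str.len (PySem.Int.toStr n) + 1).toNat
  (pvTables M (n + 1).toNat).2

-- ===== PRECONDITION & SPEC =====
-- A raises ValueError exactly on n < 0 (and so does B).
def Pre_sum_by_digit_sum_upto (n : Int) : Prop := 0 ≤ n
instance (n : Int) : Decidable (Pre_sum_by_digit_sum_upto n) := by unfold Pre_sum_by_digit_sum_upto; infer_instance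
def pvWitness_sum_by_digit_sum_upto : Int := (12)

def Spec_sum_by_digit_sum_upto (n : Int) (out : List Int) : Prop := out = sum_by_digit_sum_upto_alt n
instance (n : Int) (out : List Int) : Decidable (Spec_sum_by_digit_sum_upto n out) := by unfold Spec_sum_by_digit_sum_upto; infer_instance

-- ===== CLAIM (what is proved, stated in full; the proofs are below) =====
def Claim_equal_sum_by_digit_sum_upto : Prop := ∀ (n : Int), Dom_sum_by_digit_sum_upto n → Pre_sum_by_digit_sum_upto n → Spec_sum_by_digit_sum_upto n (sum_by_digit_sum_upto n)

-- ===== LEMMAS AND PROOFS =====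

/- ## The decimal digits produced by `str(n)` -/

/-- Decimal digits of `m`, most significant first (the digit list `str` prints). -/
def repN (m : Nat) : List Nat :=
  if m < 10 then [m] else repN (m / 10) ++ [m % 10]
decreasing_by exact Nat.div_lt_self (by omega) (by omega)

theorem toDigitsCore_eq_repN : ∀ (f m : Nat) (acc : List Char), m < f →
    Nat.toDigitsCore 10 f m acc = (repN m).map Nat.digitChar ++ acc := by
  intro f
  induction f with
  | zero => intro m acc h; omega
  | succ f ih =>
    intro m acc h
    by_cases h10 : m < 10
    · have hd : m / 10 = 0 := Nat.div_eq_of_lt h10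
      simp [Nat.toDigitsCore, hd, repN, h10, Nat.mod_eq_of_lt h10]
    · have hd : m / 10 ≠ 0 := by omega
      have hm : 0 < m := by omega
      have hlt : m / 10 < f := by
        have := Nat.div_lt_self hm (by omega : 1 < 10); omega
      simp only [Nat.toDigitsCore, hd, if_false]
      rw [ih (m / 10) _ hlt]
      conv_rhs => rw [repN]
      simp [h10]

theorem pvDigitInt_digitChar (k : Nat) (hk : k < 10) : pvDigitInt (Nat.digitChar k) = (k : Int) := by
  interval_cases k <;> decide

theorem repN_lt (m : Nat) : ∀ k ∈ repN m, k < 10 := by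
  fun_induction repN m
  case case1 m h => intro k hk; simp at hk; omega
  case case2 m h ih =>
    intro k hk
    rcases List.mem_append.1 hk with h1 | h2
    · exact ih k h1
    · simp at h2; omega

theorem repN_val (m : Nat) : ∀ a : Nat,
    (repN m).foldl (fun a k => 10 * a + k) a = 10 ^ (repN m).length * a + m := by
  fun_induction repN m
  case case1 m h => intro a; simp
  case case2 m h ih =>
    intro a
    rw [List.foldl_append, ih a]
    have hm : 10 * (m / 10) + m % 10 = m := Nat.div_add_mod m 10
    simp only [List.foldl_cons, List.foldl_nil, List.length_append, List.length_cons,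
      List.length_nil]
    nth_rewrite 4 [← hm]
    have h2 : (10 * (m / 10) + m % 10) / 10 = m / 10 := by omega
    rw [h2]
    ring_nf
    generalize a * 10 ^ (repN (m / 10)).length * 10 = t
    omega

/- ## Array updates as explicit update lists -/

def applyUpds (xs : List Int) (us : List (Nat × Int)) : List Int :=
  us.foldl (fun a u => pvAddAt a u.1 u.2) xs

theorem digits_eq_repN (n : Int) (h : 0 ≤ n) :
    (PySem.Int.toChars n).map pvDigitInt = (repN n.toNat).map (Nat.cast : Nat → Int) := by
  have hn : ¬ n < 0 := by omega
  rw [PySem.Int.toChars, if_neg hn, Nat.toDigits,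
      toDigitsCore_eq_repN _ _ _ (Nat.lt_succ_self _), List.append_nil, List.map_map]
  apply List.map_congr_left
  intro k hk
  simpa using pvDigitInt_digitChar k (repN_lt _ k hk)

theorem applyUpds_append (xs : List Int) (us vs : List (Nat × Int)) :
    applyUpds xs (us ++ vs) = applyUpds (applyUpds xs us) vs := List.foldl_append

theorem length_applyUpds (xs : List Int) (us : List (Nat × Int)) :
    (applyUpds xs us).length = xs.length := by
  induction us generalizing xs with
  | nil => rfl
  | cons u us ih => simp [applyUpds, List.foldl_cons] at ih ⊢; rw [ih]; simp [pvAddAt]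

theorem getD_pvAddAt (xs : List Int) (i : Nat) (v : Int) (j : Nat) (hj : j < xs.length) :
    (pvAddAt xs i v).getD j 0 = xs.getD j 0 + if i = j then v else 0 := by
  by_cases h : i = j
  · subst h; simp [pvAddAt, List.getD_eq_getElem?_getD, hj]
  · simp [pvAddAt, List.getD_eq_getElem?_getD, List.getElem?_set_ne h, if_neg h]

theorem getD_applyUpds (xs : List Int) (us : List (Nat × Int)) (j : Nat) (hj : j < xs.length) :
    (applyUpds xs us).getD j 0 = xs.getD j 0 + (us.map (fun u => if u.1 = j then u.2 else 0)).sum := by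
  induction us generalizing xs with
  | nil => simp [applyUpds]
  | cons u us ih =>
    have h1 : (pvAddAt xs u.1 u.2).length = xs.length := by simp [pvAddAt]
    show (applyUpds (pvAddAt xs u.1 u.2) us).getD j 0 = _
    rw [ih (pvAddAt xs u.1 u.2) (by omega), getD_pvAddAt xs u.1 u.2 j hj]
    exact add_assoc _ _ _

/- ## Reshaping A's loops into update lists -/

theorem pair_foldl_upds {α : Type} (l : List α) (i : α → Nat) (a b : α → Int)
    (p : List Int × List Int) :
    l.foldl (fun q d => (pvAddAt q.1 (i d) (a d), pvAddAt q.2 (i d) (b d))) p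
      = (applyUpds p.1 (l.map fun d => (i d, a d)), applyUpds p.2 (l.map fun d => (i d, b d))) := by
  induction l generalizing p with
  | nil => simp [applyUpds]
  | cons d l ih =>
    simp only [List.foldl_cons, List.map_cons]
    rw [ih]
    rfl

def pvW1 (sc : Int × Int) : List (Nat × Int) :=
  if sc.2 = 0 then [] else (PySem.List.pyRange 0 10 1).map (fun d => ((sc.1 + d).toNat, sc.2))

def pvW2 (sl : List Int) (sc : Int × Int) : List (Nat × Int) :=
  if sc.2 = 0 then [] else (PySem.List.pyRange 0 10 1).map
    (fun d => ((sc.1 + d).toNat, PySem.List.pyGetD sl sc.1 0 * 10 + sc.2 * d))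

theorem loose_foldl (sl : List Int) (l : List (Int × Int)) (p : List Int × List Int) :
    l.foldl (pvLooseStep sl) p
      = (applyUpds p.1 (l.flatMap pvW1), applyUpds p.2 (l.flatMap (pvW2 sl))) := by
  induction l generalizing p with
  | nil => simp [applyUpds]
  | cons sc l ih =>
    simp only [List.foldl_cons, List.flatMap_cons]
    rw [ih]
    unfold pvLooseStep pvW1 pvW2
    by_cases h : sc.2 = 0
    · simp [h]
    · simp only [h, if_false]
      rw [pair_foldl_upds]
      rw [applyUpds_append, applyUpds_append]

def pvVct (lim : Int) (sc : Int × Int) : List (Nat × Int) :=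
  if sc.2 = 0 then [] else (PySem.List.pyRange 0 (lim + 1) 1).filterMap
    (fun d => if d = lim then some ((sc.1 + d).toNat, sc.2) else none)

def pvVst (stt : List Int) (lim : Int) (sc : Int × Int) : List (Nat × Int) :=
  if sc.2 = 0 then [] else (PySem.List.pyRange 0 (lim + 1) 1).filterMap
    (fun d => if d = lim then some ((sc.1 + d).toNat, PySem.List.pyGetD stt sc.1 0 * 10 + sc.2 * d) else none)

def pvVcl (lim : Int) (sc : Int × Int) : List (Nat × Int) :=
  if sc.2 = 0 then [] else (PySem.List.pyRange 0 (lim + 1) 1).filterMap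
    (fun d => if d = lim then none else some ((sc.1 + d).toNat, sc.2))

def pvVsl (stt : List Int) (lim : Int) (sc : Int × Int) : List (Nat × Int) :=
  if sc.2 = 0 then [] else (PySem.List.pyRange 0 (lim + 1) 1).filterMap
    (fun d => if d = lim then none else some ((sc.1 + d).toNat, PySem.List.pyGetD stt sc.1 0 * 10 + sc.2 * d))

theorem quad_foldl_upds {α : Type} (l : List α) (Q : α → Bool) (i : α → Nat) (a b : α → Int)
    (r : pvQuad) :
    l.foldl (fun r d =>
        if Q d then
          ((pvAddAt r.1.1 (i d) (a d), pvAddAt r.1.2 (i d) (b d)), r.2)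
        else
          (r.1, (pvAddAt r.2.1 (i d) (a d), pvAddAt r.2.2 (i d) (b d)))) r
      = ((applyUpds r.1.1 (l.filterMap fun d => if Q d then some (i d, a d) else none),
          applyUpds r.1.2 (l.filterMap fun d => if Q d then some (i d, b d) else none)),
         (applyUpds r.2.1 (l.filterMap fun d => if Q d then none else some (i d, a d)),
          applyUpds r.2.2 (l.filterMap fun d => if Q d then none else some (i d, b d)))) := by
  induction l generalizing r with
  | nil => simp [applyUpds]
  | cons d l ih =>
    simp only [List.foldl_cons, List.filterMap_cons]
    by_cases h : Q d
    · simp only [h, if_true]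
      rw [ih]
      rfl
    · simp only [h, if_false, Bool.false_eq_true]
      rw [ih]
      rfl

theorem tight_foldl (stt : List Int) (lim : Int) (l : List (Int × Int)) (r : pvQuad) :
    l.foldl (pvTightStep stt lim) r
      = ((applyUpds r.1.1 (l.flatMap (pvVct lim)), applyUpds r.1.2 (l.flatMap (pvVst stt lim))),
         (applyUpds r.2.1 (l.flatMap (pvVcl lim)), applyUpds r.2.2 (l.flatMap (pvVsl stt lim)))) := by
  induction l generalizing r with
  | nil => simp [applyUpds]
  | cons sc l ih =>
    simp only [List.foldl_cons, List.flatMap_cons]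
    rw [ih]
    unfold pvTightStep pvVct pvVst pvVcl pvVsl
    by_cases h : sc.2 = 0
    · simp [h]
    · simp only [h, if_false]
      have hfe : (fun (r : pvQuad) (d : Int) =>
            if d = lim then
              ((pvAddAt r.1.1 (sc.1 + d).toNat sc.2,
                pvAddAt r.1.2 (sc.1 + d).toNat (PySem.List.pyGetD stt sc.1 0 * 10 + sc.2 * d)), r.2)
            else
              (r.1, (pvAddAt r.2.1 (sc.1 + d).toNat sc.2,
                     pvAddAt r.2.2 (sc.1 + d).toNat (PySem.List.pyGetD stt sc.1 0 * 10 + sc.2 * d))))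
          = (fun (r : pvQuad) (d : Int) =>
            if (decide (d = lim) : Bool) then
              ((pvAddAt r.1.1 (sc.1 + d).toNat sc.2,
                pvAddAt r.1.2 (sc.1 + d).toNat (PySem.List.pyGetD stt sc.1 0 * 10 + sc.2 * d)), r.2)
            else
              (r.1, (pvAddAt r.2.1 (sc.1 + d).toNat sc.2,
                     pvAddAt r.2.2 (sc.1 + d).toNat (PySem.List.pyGetD stt sc.1 0 * 10 + sc.2 * d)))) := by
        funext r d; simp
      rw [hfe]
      rw [quad_foldl_upds (PySem.List.pyRange 0 (lim+1) 1) (fun d => decide (d = lim))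
            (fun d => (sc.1 + d).toNat) (fun _ => sc.2)
            (fun d => PySem.List.pyGetD stt sc.1 0 * 10 + sc.2 * d) r]
      simp only [decide_eq_true_eq]
      rw [applyUpds_append, applyUpds_append, applyUpds_append, applyUpds_append]

/- ## The common specification: sums grouped by digit sum -/

def cntF (v j : Nat) : Int := ∑ x ∈ Finset.range v, if pvDigitSum x = j then 1 else 0
def sumF (v j : Nat) : Int := ∑ x ∈ Finset.range v, if pvDigitSum x = j then (x : Int) else 0

theorem pvDigitSum_step (q r : Nat) (hr : r < 10) : pvDigitSum (10 * q + r) = pvDigitSum q + r := by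
  rw [pvDigitSum]
  by_cases hq : 10 * q + r = 0
  · have h0 : q = 0 ∧ r = 0 := by omega
    simp [h0.1, h0.2, pvDigitSum]
  · rw [if_neg hq]
    have h1 : (10 * q + r) % 10 = r := by omega
    have h2 : (10 * q + r) / 10 = q := by omega
    rw [h1, h2, Nat.add_comm]

theorem cntF_zero_sumF_zero (v j : Nat) (h : cntF v j = 0) : sumF v j = 0 := by
  unfold cntF at h
  unfold sumF
  apply Finset.sum_eq_zero
  intro x hx
  by_cases hds : pvDigitSum x = j
  · exfalso
    have h1 : ∀ y ∈ Finset.range v, (0:Int) ≤ if pvDigitSum y = j then 1 else 0 := by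
      intro y _; split <;> simp
    have := (Finset.sum_eq_zero_iff_of_nonneg h1).1 h x hx
    simp [hds] at this
  · simp [hds]

theorem sum_range_add' {M : Type} [AddCommMonoid M] (φ : Nat → M) (a b : Nat) :
    ∑ x ∈ Finset.range (a + b), φ x = (∑ x ∈ Finset.range a, φ x) + ∑ r ∈ Finset.range b, φ (a + r) := by
  induction b with
  | zero => simp
  | succ b ih =>
    rw [show a + (b+1) = (a+b) + 1 from rfl, Finset.sum_range_succ, ih,
        Finset.sum_range_succ, add_assoc]

theorem sum_range_mul10 {M : Type} [AddCommMonoid M] (φ : Nat → M) (v : Nat) :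
    ∑ x ∈ Finset.range (10 * v), φ x = ∑ q ∈ Finset.range v, ∑ r ∈ Finset.range 10, φ (10 * q + r) := by
  induction v with
  | zero => simp
  | succ v ih =>
    rw [show 10 * (v+1) = 10 * v + 10 from by ring, sum_range_add' φ (10*v) 10, ih,
        Finset.sum_range_succ (fun q => ∑ r ∈ Finset.range 10, φ (10 * q + r)) v]

/- ## Evaluating update lists as sums -/

theorem listSum_range (n : Nat) (f : Nat → Int) :
    ((List.range n).map f).sum = ∑ i ∈ Finset.range n, f i := rfl

theorem sum_map_flatMap {α β : Type} (l : List α) (u : α → List β) (w : β → Int) :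
    ((l.flatMap u).map w).sum = (l.map (fun x => ((u x).map w).sum)).sum := by
  induction l with
  | nil => rfl
  | cons x l ih => simp [List.flatMap_cons, List.map_append, List.sum_append, ih]

theorem filterMap_some {α β : Type} (l : List α) (g : α → Option β) (F : α → β)
    (h : ∀ d ∈ l, g d = some (F d)) : l.filterMap g = l.map F := by
  induction l with
  | nil => rfl
  | cons x l ih =>
    rw [List.filterMap_cons, h x List.mem_cons_self, List.map_cons,
      ih (fun d hd => h d (List.mem_cons_of_mem x hd))]

theorem getD_applyUpds_enum (xs base : List Int) (U : Int × Int → List (Nat × Int)) (j : Nat)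
    (hj : j < base.length) :
    (applyUpds base ((PySem.List.enumerate xs).flatMap U)).getD j 0
      = base.getD j 0 + ∑ s ∈ Finset.range xs.length,
          ((U ((s : Int), xs.getD s 0)).map (fun u => if u.1 = j then u.2 else 0)).sum := by
  rw [getD_applyUpds _ _ j hj, PySem.List.enumerate_eq_map_pyRange xs 0, PySem.List.pyRange_one]
  simp only [PySem.List.len_eq, Int.sub_zero, Int.toNat_natCast, List.flatMap_map, List.map_map,
    zero_add]
  rw [sum_map_flatMap, ← listSum_range]
  congr 1
  refine congrArg List.sum ?_
  apply List.map_congr_left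
  intro s _
  simp [Function.comp, PySem.List.pyGetD_natCast]

theorem eval_W1 (s j : Nat) (c : Int) :
    ((pvW1 ((s : Int), c)).map (fun u => if u.1 = j then u.2 else 0)).sum
      = if c = 0 then 0 else ∑ d ∈ Finset.range 10, if s + d = j then c else 0 := by
  unfold pvW1
  by_cases h : c = 0
  · simp [h]
  · simp only [h, if_false, PySem.List.pyRange_one, List.map_map]
    rw [show ((10:Int) - 0).toNat = 10 from rfl, ← listSum_range]
    apply congrArg
    apply List.map_congr_left
    intro d _
    simp only [Function.comp_apply, zero_add]
    rw [show ((s : Int) + (d : Int)).toNat = s + d from by omega]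

theorem eval_W2 (sl : List Int) (s j : Nat) (c : Int) :
    ((pvW2 sl ((s : Int), c)).map (fun u => if u.1 = j then u.2 else 0)).sum
      = if c = 0 then 0 else
          ∑ d ∈ Finset.range 10, if s + d = j then sl.getD s 0 * 10 + c * (d : Int) else 0 := by
  unfold pvW2
  by_cases h : c = 0
  · simp [h]
  · simp only [h, if_false, PySem.List.pyRange_one, List.map_map]
    rw [show ((10:Int) - 0).toNat = 10 from rfl, ← listSum_range]
    apply congrArg
    apply List.map_congr_left
    intro d _
    simp only [Function.comp_apply, zero_add, PySem.List.pyGetD_natCast]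
    rw [show ((s : Int) + (d : Int)).toNat = s + d from by omega]

theorem pyRange_filterMap_eq {β : Type} (k : Nat) (F : Int → β) :
    (PySem.List.pyRange 0 ((k : Int) + 1) 1).filterMap
        (fun d => if d = (k : Int) then some (F d) else none) = [F (k : Int)] := by
  rw [PySem.List.pyRange_one, List.filterMap_map,
    show (((k : Int) + 1) - 0).toNat = k + 1 by omega, List.range_succ, List.filterMap_append]
  have h1 : (List.range k).filterMap
      ((fun d => if d = (k : Int) then some (F d) else none) ∘ fun d : Nat => (0 : Int) + (d : Int)) = [] := by
    apply List.filterMap_eq_nil_iff.2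
    intro d hd
    have hdk : d < k := List.mem_range.1 hd
    simp only [Function.comp_apply, zero_add]
    rw [if_neg (by exact_mod_cast Nat.ne_of_lt hdk)]
  rw [h1]
  simp

theorem pyRange_filterMap_ne {β : Type} (k : Nat) (F : Int → β) :
    (PySem.List.pyRange 0 ((k : Int) + 1) 1).filterMap
        (fun d => if d = (k : Int) then none else some (F d)) = (List.range k).map (fun d : Nat => F (d : Int)) := by
  rw [PySem.List.pyRange_one, List.filterMap_map,
    show (((k : Int) + 1) - 0).toNat = k + 1 by omega, List.range_succ, List.filterMap_append]
  have h1 : ([k]).filterMap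
      ((fun d => if d = (k : Int) then none else some (F d)) ∘ fun d : Nat => (0 : Int) + (d : Int)) = [] := by
    simp
  rw [h1, List.append_nil]
  apply filterMap_some
  intro d hd
  have hdk : d < k := List.mem_range.1 hd
  simp only [Function.comp_apply, zero_add]
  rw [if_neg (by exact_mod_cast Nat.ne_of_lt hdk)]

theorem eval_Vct (lim : Nat) (s j : Nat) (c : Int) :
    ((pvVct (lim : Int) ((s : Int), c)).map (fun u => if u.1 = j then u.2 else 0)).sum
      = if c = 0 then 0 else (if s + lim = j then c else 0) := by
  unfold pvVct
  by_cases h : c = 0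
  · simp [h]
  · simp only [h, if_false]
    rw [pyRange_filterMap_eq lim (fun d => (((s : Int) + d).toNat, c))]
    simp only [List.map_cons, List.map_nil, List.sum_cons, List.sum_nil, add_zero]
    rw [show ((s : Int) + (lim : Int)).toNat = s + lim from by omega]

theorem eval_Vst (stt : List Int) (lim : Nat) (s j : Nat) (c : Int) :
    ((pvVst stt (lim : Int) ((s : Int), c)).map (fun u => if u.1 = j then u.2 else 0)).sum
      = if c = 0 then 0 else
          (if s + lim = j then stt.getD s 0 * 10 + c * (lim : Int) else 0) := by
  unfold pvVst
  by_cases h : c = 0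
  · simp [h]
  · simp only [h, if_false]
    rw [pyRange_filterMap_eq lim
      (fun d => (((s : Int) + d).toNat, PySem.List.pyGetD stt (s : Int) 0 * 10 + c * d))]
    simp only [List.map_cons, List.map_nil, List.sum_cons, List.sum_nil, add_zero,
      PySem.List.pyGetD_natCast]
    rw [show ((s : Int) + (lim : Int)).toNat = s + lim from by omega]

theorem eval_Vcl (lim : Nat) (s j : Nat) (c : Int) :
    ((pvVcl (lim : Int) ((s : Int), c)).map (fun u => if u.1 = j then u.2 else 0)).sum
      = if c = 0 then 0 else ∑ d ∈ Finset.range lim, if s + d = j then c else 0 := by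
  unfold pvVcl
  by_cases h : c = 0
  · simp [h]
  · simp only [h, if_false]
    rw [pyRange_filterMap_ne lim (fun d => (((s : Int) + d).toNat, c)), List.map_map,
      ← listSum_range]
    apply congrArg
    apply List.map_congr_left
    intro d _
    simp only [Function.comp_apply]
    rw [show ((s : Int) + (d : Int)).toNat = s + d from by omega]

theorem eval_Vsl (stt : List Int) (lim : Nat) (s j : Nat) (c : Int) :
    ((pvVsl stt (lim : Int) ((s : Int), c)).map (fun u => if u.1 = j then u.2 else 0)).sum
      = if c = 0 then 0 else
          ∑ d ∈ Finset.range lim, if s + d = j then stt.getD s 0 * 10 + c * (d : Int) else 0 := by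
  unfold pvVsl
  by_cases h : c = 0
  · simp [h]
  · simp only [h, if_false]
    rw [pyRange_filterMap_ne lim
      (fun d => (((s : Int) + d).toNat, PySem.List.pyGetD stt (s : Int) 0 * 10 + c * d)),
      List.map_map, ← listSum_range]
    apply congrArg
    apply List.map_congr_left
    intro d _
    simp only [Function.comp_apply, PySem.List.pyGetD_natCast]
    rw [show ((s : Int) + (d : Int)).toNat = s + d from by omega]

/- ## Arithmetic of the DP transition -/

theorem sum_ite_eq_range (M t : Nat) (f : Nat → Int) :
    (∑ s ∈ Finset.range M, if t = s then f s else 0) = if t < M then f t else 0 := by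
  rw [Finset.sum_ite_eq (Finset.range M) t f]
  simp

theorem sum_shift (M j : Nat) (hj : j < M) (f : Nat → Int) (d : Nat) :
    (∑ s ∈ Finset.range M, if s + d = j then f s else 0) = if d ≤ j then f (j - d) else 0 := by
  by_cases hd : d ≤ j
  · rw [if_pos hd]
    calc (∑ s ∈ Finset.range M, if s + d = j then f s else 0)
        = ∑ s ∈ Finset.range M, if s = j - d then f s else 0 :=
          Finset.sum_congr rfl (fun s _ => if_congr (by omega) rfl rfl)
      _ = if j - d < M then f (j - d) else 0 := by
          rw [Finset.sum_ite_eq' (Finset.range M) (j - d) f]; simp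
      _ = f (j - d) := if_pos (by omega)
  · rw [if_neg hd]
    exact Finset.sum_eq_zero (fun s _ => if_neg (by omega))

theorem arith_ct (N v k j : Nat) (hk : k < 10) (hj : j < N + 1) (e : Int) :
    (∑ s ∈ Finset.range (N + 1), if pvDigitSum v = s then (if s + k = j then e else 0) else 0)
      = if pvDigitSum (10 * v + k) = j then e else 0 := by
  rw [sum_ite_eq_range (N + 1) (pvDigitSum v) (fun s => if s + k = j then e else 0),
    pvDigitSum_step v k hk]
  by_cases hv : pvDigitSum v < N + 1
  · rw [if_pos hv]
  · rw [if_neg hv, eq_comm]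
    exact if_neg (by omega)

theorem arith_cl (N v k j : Nat) (hk : k < 10) (hj : j < N + 1) :
    ((∑ s ∈ Finset.range (N + 1), ∑ d ∈ Finset.range 10, if s + d = j then cntF v s else 0)
      + ∑ s ∈ Finset.range (N + 1), if pvDigitSum v = s then
          (∑ d ∈ Finset.range k, if s + d = j then (1 : Int) else 0) else 0)
      = cntF (10 * v + k) j := by
  have hdecomp : cntF (10 * v + k) j
      = (∑ q ∈ Finset.range v, ∑ r ∈ Finset.range 10,
          if pvDigitSum (10 * q + r) = j then (1 : Int) else 0)
        + ∑ r ∈ Finset.range k, if pvDigitSum (10 * v + r) = j then (1 : Int) else 0 := by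
    simp only [cntF]
    rw [sum_range_add' (fun x => if pvDigitSum x = j then (1 : Int) else 0) (10 * v) k,
      sum_range_mul10]
  rw [hdecomp]
  congr 1
  · rw [Finset.sum_comm]
    conv_rhs => rw [Finset.sum_comm]
    apply Finset.sum_congr rfl
    intro d hd
    have hd10 : d < 10 := Finset.mem_range.1 hd
    rw [sum_shift (N + 1) j hj (cntF v) d]
    by_cases hdj : d ≤ j
    · rw [if_pos hdj]
      simp only [cntF]
      apply Finset.sum_congr rfl
      intro q _
      rw [pvDigitSum_step q d hd10]
      exact if_congr (by omega) rfl rfl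
    · rw [if_neg hdj, eq_comm]
      exact Finset.sum_eq_zero (fun q _ => by
        rw [pvDigitSum_step q d hd10]; exact if_neg (by omega))
  · rw [sum_ite_eq_range (N + 1) (pvDigitSum v)
      (fun s => ∑ d ∈ Finset.range k, if s + d = j then (1 : Int) else 0)]
    by_cases hv : pvDigitSum v < N + 1
    · rw [if_pos hv]
      apply Finset.sum_congr rfl
      intro r hr
      have hr10 : r < 10 := by have := Finset.mem_range.1 hr; omega
      rw [pvDigitSum_step v r hr10]
    · rw [if_neg hv, eq_comm]
      exact Finset.sum_eq_zero (fun r hr => by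
        rw [pvDigitSum_step v r (by have := Finset.mem_range.1 hr; omega)]
        exact if_neg (by omega))

theorem arith_sl (N v k j : Nat) (hk : k < 10) (hj : j < N + 1) :
    ((∑ s ∈ Finset.range (N + 1), ∑ d ∈ Finset.range 10,
        if s + d = j then sumF v s * 10 + cntF v s * (d : Int) else 0)
      + ∑ s ∈ Finset.range (N + 1), if pvDigitSum v = s then
          (∑ d ∈ Finset.range k, if s + d = j then (v : Int) * 10 + 1 * (d : Int) else 0) else 0)
      = sumF (10 * v + k) j := by
  have hdecomp : sumF (10 * v + k) j
      = (∑ q ∈ Finset.range v, ∑ r ∈ Finset.range 10,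
          if pvDigitSum (10 * q + r) = j then ((10 * q + r : Nat) : Int) else 0)
        + ∑ r ∈ Finset.range k, if pvDigitSum (10 * v + r) = j then ((10 * v + r : Nat) : Int) else 0 := by
    simp only [sumF]
    rw [sum_range_add' (fun x => if pvDigitSum x = j then (x : Int) else 0) (10 * v) k,
      sum_range_mul10]
  rw [hdecomp]
  congr 1
  · rw [Finset.sum_comm]
    conv_rhs => rw [Finset.sum_comm]
    apply Finset.sum_congr rfl
    intro d hd
    have hd10 : d < 10 := Finset.mem_range.1 hd
    rw [sum_shift (N + 1) j hj (fun s => sumF v s * 10 + cntF v s * (d : Int)) d]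
    by_cases hdj : d ≤ j
    · rw [if_pos hdj]
      calc (sumF v (j - d) * 10 + cntF v (j - d) * (d : Int))
          = ∑ q ∈ Finset.range v,
              ((if pvDigitSum q = j - d then (q : Int) else 0) * 10
                + (if pvDigitSum q = j - d then (1 : Int) else 0) * (d : Int)) := by
            rw [Finset.sum_add_distrib, ← Finset.sum_mul, ← Finset.sum_mul]
            rfl
        _ = ∑ q ∈ Finset.range v, if pvDigitSum (10 * q + d) = j then ((10 * q + d : Nat) : Int) else 0 := by
            apply Finset.sum_congr rfl
            intro q _
            rw [pvDigitSum_step q d hd10]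
            by_cases hq : pvDigitSum q = j - d
            · rw [if_pos hq, if_pos hq, if_pos (show pvDigitSum q + d = j by omega)]
              push_cast
              ring
            · rw [if_neg hq, if_neg hq, if_neg (show ¬ pvDigitSum q + d = j by omega)]
              ring
    · rw [if_neg hdj, eq_comm]
      exact Finset.sum_eq_zero (fun q _ => by
        rw [pvDigitSum_step q d hd10]; exact if_neg (by omega))
  · rw [sum_ite_eq_range (N + 1) (pvDigitSum v)
      (fun s => ∑ d ∈ Finset.range k, if s + d = j then (v : Int) * 10 + 1 * (d : Int) else 0)]
    by_cases hv : pvDigitSum v < N + 1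
    · rw [if_pos hv]
      apply Finset.sum_congr rfl
      intro r hr
      have hr10 : r < 10 := by have := Finset.mem_range.1 hr; omega
      rw [pvDigitSum_step v r hr10]
      by_cases hc : pvDigitSum v + r = j
      · rw [if_pos hc, if_pos hc]
        push_cast
        ring
      · rw [if_neg hc, if_neg hc]
    · rw [if_neg hv, eq_comm]
      exact Finset.sum_eq_zero (fun r hr => by
        rw [pvDigitSum_step v r (by have := Finset.mem_range.1 hr; omega)]
        exact if_neg (by omega))

/- ## The DP invariant -/

def pvInv (N v : Nat) (st : pvQuad) : Prop :=
  st.1.1.length = N + 1 ∧ st.1.2.length = N + 1 ∧ st.2.1.length = N + 1 ∧ st.2.2.length = N + 1 ∧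
  (∀ j, j < N + 1 → st.1.1.getD j 0 = (if pvDigitSum v = j then 1 else 0)) ∧
  (∀ j, j < N + 1 → st.1.2.getD j 0 = (if pvDigitSum v = j then (v : Int) else 0)) ∧
  (∀ j, j < N + 1 → st.2.1.getD j 0 = cntF v j) ∧
  (∀ j, j < N + 1 → st.2.2.getD j 0 = sumF v j)

theorem dp_step (N v k : Nat) (hk : k < 10) (st : pvQuad) (h : pvInv N v st) :
    pvInv N (10 * v + k) (pvDigitStep (List.replicate (N + 1) 0) st (k : Int)) := by
  obtain ⟨⟨ct, stt⟩, cl, sl⟩ := st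
  obtain ⟨h11, h12, h21, h22, hct, hst, hcl, hsl⟩ := h
  have hzg : ∀ j : Nat, (List.replicate (N + 1) (0 : Int)).getD j 0 = 0 := by
    intro j
    simp [List.getD_eq_getElem?_getD, List.getElem?_replicate]
    split <;> rfl
  unfold pvInv pvDigitStep
  simp only
  rw [loose_foldl, tight_foldl]
  refine ⟨by simp [length_applyUpds], by simp [length_applyUpds],
    by simp [length_applyUpds], by simp [length_applyUpds], ?_, ?_, ?_, ?_⟩
  · -- cnt_tight
    intro j hj
    rw [getD_applyUpds_enum ct _ (pvVct (k : Int)) j (by simp; omega), hzg j, h11]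
    have e1 : ∀ s ∈ Finset.range (N + 1),
        ((pvVct (k : Int) ((s : Int), ct.getD s 0)).map (fun u => if u.1 = j then u.2 else 0)).sum
          = (if pvDigitSum v = s then (if s + k = j then (1 : Int) else 0) else 0) := by
      intro s hs
      rw [eval_Vct k s j (ct.getD s 0), hct s (Finset.mem_range.1 hs)]
      by_cases hdv : pvDigitSum v = s
      · simp [hdv]
      · simp [hdv]
    rw [Finset.sum_congr rfl e1, arith_ct N v k j hk hj 1, zero_add]
  · -- sum_tight
    intro j hj
    rw [getD_applyUpds_enum ct _ (pvVst stt (k : Int)) j (by simp; omega), hzg j, h11]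
    have e1 : ∀ s ∈ Finset.range (N + 1),
        ((pvVst stt (k : Int) ((s : Int), ct.getD s 0)).map (fun u => if u.1 = j then u.2 else 0)).sum
          = (if pvDigitSum v = s then (if s + k = j then ((v : Int) * 10 + 1 * (k : Int)) else 0) else 0) := by
      intro s hs
      rw [eval_Vst stt k s j (ct.getD s 0), hct s (Finset.mem_range.1 hs),
        hst s (Finset.mem_range.1 hs)]
      by_cases hdv : pvDigitSum v = s
      · simp [hdv]
      · simp [hdv]
    rw [Finset.sum_congr rfl e1, arith_ct N v k j hk hj ((v : Int) * 10 + 1 * (k : Int)), zero_add]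
    by_cases hds : pvDigitSum (10 * v + k) = j
    · rw [if_pos hds, if_pos hds]
      push_cast
      ring
    · rw [if_neg hds, if_neg hds]
  · -- cnt_loose
    intro j hj
    rw [getD_applyUpds_enum ct _ (pvVcl (k : Int)) j (by simp [length_applyUpds]; omega),
      getD_applyUpds_enum cl _ pvW1 j (by simp; omega), hzg j, h11, h21]
    have e1 : ∀ s ∈ Finset.range (N + 1),
        ((pvW1 ((s : Int), cl.getD s 0)).map (fun u => if u.1 = j then u.2 else 0)).sum
          = ∑ d ∈ Finset.range 10, if s + d = j then cntF v s else 0 := by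
      intro s hs
      rw [eval_W1 s j (cl.getD s 0), hcl s (Finset.mem_range.1 hs)]
      by_cases hc : cntF v s = 0
      · simp [hc]
      · simp [hc]
    have e2 : ∀ s ∈ Finset.range (N + 1),
        ((pvVcl (k : Int) ((s : Int), ct.getD s 0)).map (fun u => if u.1 = j then u.2 else 0)).sum
          = (if pvDigitSum v = s then
              (∑ d ∈ Finset.range k, if s + d = j then (1 : Int) else 0) else 0) := by
      intro s hs
      rw [eval_Vcl k s j (ct.getD s 0), hct s (Finset.mem_range.1 hs)]
      by_cases hdv : pvDigitSum v = s
      · simp [hdv]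
      · simp [hdv]
    rw [Finset.sum_congr rfl e1, Finset.sum_congr rfl e2, zero_add]
    exact arith_cl N v k j hk hj
  · -- sum_loose
    intro j hj
    rw [getD_applyUpds_enum ct _ (pvVsl stt (k : Int)) j (by simp [length_applyUpds]; omega),
      getD_applyUpds_enum cl _ (pvW2 sl) j (by simp; omega), hzg j, h11, h21]
    have e1 : ∀ s ∈ Finset.range (N + 1),
        ((pvW2 sl ((s : Int), cl.getD s 0)).map (fun u => if u.1 = j then u.2 else 0)).sum
          = ∑ d ∈ Finset.range 10, if s + d = j then sumF v s * 10 + cntF v s * (d : Int) else 0 := by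
      intro s hs
      rw [eval_W2 sl s j (cl.getD s 0), hcl s (Finset.mem_range.1 hs),
        hsl s (Finset.mem_range.1 hs)]
      by_cases hc : cntF v s = 0
      · simp [hc, cntF_zero_sumF_zero v s hc]
      · simp [hc]
    have e2 : ∀ s ∈ Finset.range (N + 1),
        ((pvVsl stt (k : Int) ((s : Int), ct.getD s 0)).map (fun u => if u.1 = j then u.2 else 0)).sum
          = (if pvDigitSum v = s then
              (∑ d ∈ Finset.range k, if s + d = j then (v : Int) * 10 + 1 * (d : Int) else 0) else 0) := by
      intro s hs
      rw [eval_Vsl stt k s j (ct.getD s 0), hct s (Finset.mem_range.1 hs),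
        hst s (Finset.mem_range.1 hs)]
      by_cases hdv : pvDigitSum v = s
      · simp [hdv]
      · simp [hdv]
    rw [Finset.sum_congr rfl e1, Finset.sum_congr rfl e2, zero_add]
    exact arith_sl N v k j hk hj

theorem dp_fold (N : Nat) (ds : List Nat) (hds : ∀ k ∈ ds, k < 10) :
    ∀ (v : Nat) (st : pvQuad), pvInv N v st →
    pvInv N (ds.foldl (fun a k => 10 * a + k) v)
        (ds.foldl (fun st (k : Nat) => pvDigitStep (List.replicate (N + 1) 0) st (k : Int)) st) := by
  intro v st h
  induction ds generalizing v st with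
  | nil => exact h
  | cons k ds ih =>
    simp only [List.foldl_cons]
    exact ih (fun d hd => hds d (List.mem_cons_of_mem k hd)) _ _
      (dp_step N v k (hds k List.mem_cons_self) st h)

theorem inv_init (N : Nat) :
    pvInv N 0 (((List.replicate (N + 1) (0 : Int)).set 0 1, List.replicate (N + 1) 0),
             (List.replicate (N + 1) 0, List.replicate (N + 1) 0)) := by
  have h0 : pvDigitSum 0 = 0 := by rw [pvDigitSum]; simp
  have hN : ∀ j : Nat, j < N + 1 → j ≤ N := fun j hj => by omega
  refine ⟨by simp, by simp, by simp, by simp, ?_, ?_, ?_, ?_⟩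
  · intro j hj
    rw [h0]
    by_cases hj0 : j = 0
    · subst hj0
      simp [List.getD_eq_getElem?_getD, hj]
    · simp [List.getD_eq_getElem?_getD, Ne.symm hj0, hN j hj]
  · intro j hj
    rw [h0]
    simp [List.getD_eq_getElem?_getD, hj]
  · intro j hj
    simp [List.getD_eq_getElem?_getD, hj, cntF]
  · intro j hj
    simp [List.getD_eq_getElem?_getD, hj, sumF]

/- ## B's recursion -/

theorem bloop_foldl (cu tu : List Int) (l : List Nat) (q0 : List Int × List Int) :
    l.foldl (fun q s =>
        if cu.getD s 0 = 0 then q else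
          (List.range 10).foldl (fun q2 d =>
              (pvAddAt q2.1 (s + d) (cu.getD s 0),
               pvAddAt q2.2 (s + d) (10 * tu.getD s 0 + (d : Int) * cu.getD s 0))) q) q0
      = (applyUpds q0.1 (l.flatMap fun s => if cu.getD s 0 = 0 then [] else
            (List.range 10).map (fun d => (s + d, cu.getD s 0))),
         applyUpds q0.2 (l.flatMap fun s => if cu.getD s 0 = 0 then [] else
            (List.range 10).map (fun d => (s + d, 10 * tu.getD s 0 + (d : Int) * cu.getD s 0)))) := by
  induction l generalizing q0 with
  | nil => simp [applyUpds]
  | cons s l ih =>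
    simp only [List.foldl_cons, List.flatMap_cons]
    rw [ih]
    by_cases h : cu.getD s 0 = 0
    · rw [if_pos h, if_pos h, if_pos h]
      simp only [List.nil_append]
    · simp only [h, if_false]
      rw [pair_foldl_upds, applyUpds_append, applyUpds_append]

theorem getD_applyUpds_range (M' : Nat) (base : List Int) (U : Nat → List (Nat × Int)) (j : Nat)
    (hj : j < base.length) :
    (applyUpds base ((List.range M').flatMap U)).getD j 0
      = base.getD j 0 + ∑ s ∈ Finset.range M',
          ((U s).map (fun u => if u.1 = j then u.2 else 0)).sum := by
  rw [getD_applyUpds _ _ j hj, sum_map_flatMap, listSum_range]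

theorem arith_cl' (M u r j : Nat) (hr : r < 10) (hj : j < M) :
    ((∑ s ∈ Finset.range M, ∑ d ∈ Finset.range 10, if s + d = j then cntF u s else 0)
      + ∑ d ∈ Finset.range r, if pvDigitSum u + d = j then (1 : Int) else 0)
      = cntF (10 * u + r) j := by
  have hdecomp : cntF (10 * u + r) j
      = (∑ q ∈ Finset.range u, ∑ d ∈ Finset.range 10,
          if pvDigitSum (10 * q + d) = j then (1 : Int) else 0)
        + ∑ d ∈ Finset.range r, if pvDigitSum (10 * u + d) = j then (1 : Int) else 0 := by
    simp only [cntF]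
    rw [sum_range_add' (fun x => if pvDigitSum x = j then (1 : Int) else 0) (10 * u) r,
      sum_range_mul10]
  rw [hdecomp]
  congr 1
  · rw [Finset.sum_comm]
    conv_rhs => rw [Finset.sum_comm]
    apply Finset.sum_congr rfl
    intro d hd
    have hd10 : d < 10 := Finset.mem_range.1 hd
    rw [sum_shift M j hj (cntF u) d]
    by_cases hdj : d ≤ j
    · rw [if_pos hdj]
      simp only [cntF]
      apply Finset.sum_congr rfl
      intro q _
      rw [pvDigitSum_step q d hd10]
      exact if_congr (by omega) rfl rfl
    · rw [if_neg hdj, eq_comm]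
      exact Finset.sum_eq_zero (fun q _ => by
        rw [pvDigitSum_step q d hd10]; exact if_neg (by omega))
  · apply Finset.sum_congr rfl
    intro d hd
    rw [pvDigitSum_step u d (by have := Finset.mem_range.1 hd; omega)]

theorem arith_sl' (M u r j : Nat) (hr : r < 10) (hj : j < M) :
    ((∑ s ∈ Finset.range M, ∑ d ∈ Finset.range 10,
        if s + d = j then 10 * sumF u s + (d : Int) * cntF u s else 0)
      + ∑ d ∈ Finset.range r, if pvDigitSum u + d = j then 10 * (u : Int) + (d : Int) else 0)
      = sumF (10 * u + r) j := by
  have hdecomp : sumF (10 * u + r) j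
      = (∑ q ∈ Finset.range u, ∑ d ∈ Finset.range 10,
          if pvDigitSum (10 * q + d) = j then ((10 * q + d : Nat) : Int) else 0)
        + ∑ d ∈ Finset.range r, if pvDigitSum (10 * u + d) = j then ((10 * u + d : Nat) : Int) else 0 := by
    simp only [sumF]
    rw [sum_range_add' (fun x => if pvDigitSum x = j then (x : Int) else 0) (10 * u) r,
      sum_range_mul10]
  rw [hdecomp]
  congr 1
  · rw [Finset.sum_comm]
    conv_rhs => rw [Finset.sum_comm]
    apply Finset.sum_congr rfl
    intro d hd
    have hd10 : d < 10 := Finset.mem_range.1 hd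
    rw [sum_shift M j hj (fun s => 10 * sumF u s + (d : Int) * cntF u s) d]
    by_cases hdj : d ≤ j
    · rw [if_pos hdj]
      calc (10 * sumF u (j - d) + (d : Int) * cntF u (j - d))
          = ∑ q ∈ Finset.range u,
              (10 * (if pvDigitSum q = j - d then (q : Int) else 0)
                + (d : Int) * (if pvDigitSum q = j - d then (1 : Int) else 0)) := by
            rw [Finset.sum_add_distrib, ← Finset.mul_sum, ← Finset.mul_sum]
            rfl
        _ = ∑ q ∈ Finset.range u,
              if pvDigitSum (10 * q + d) = j then ((10 * q + d : Nat) : Int) else 0 := by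
            apply Finset.sum_congr rfl
            intro q _
            rw [pvDigitSum_step q d hd10]
            by_cases hq : pvDigitSum q = j - d
            · rw [if_pos hq, if_pos hq, if_pos (show pvDigitSum q + d = j by omega)]
              push_cast
              ring
            · rw [if_neg hq, if_neg hq, if_neg (show ¬ pvDigitSum q + d = j by omega)]
              ring
    · rw [if_neg hdj, eq_comm]
      exact Finset.sum_eq_zero (fun q _ => by
        rw [pvDigitSum_step q d hd10]; exact if_neg (by omega))
  · apply Finset.sum_congr rfl
    intro d hd
    rw [pvDigitSum_step u d (by have := Finset.mem_range.1 hd; omega)]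
    by_cases hc : pvDigitSum u + d = j
    · rw [if_pos hc, if_pos hc]
      push_cast
      ring
    · rw [if_neg hc, if_neg hc]

theorem tables_spec (M : Nat) (t : Nat) :
    (pvTables M t).1.length = M ∧ (pvTables M t).2.length = M ∧
    (∀ j, j < M → (pvTables M t).1.getD j 0 = cntF t j) ∧
    (∀ j, j < M → (pvTables M t).2.getD j 0 = sumF t j) := by
  induction t using Nat.strong_induction_on with
  | _ t ih =>
    rw [pvTables]
    by_cases ht : t = 0
    · subst ht
      refine ⟨by simp, by simp, ?_, ?_⟩ <;>
        (intro j hj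
         simp [List.getD_eq_getElem?_getD, hj, cntF, sumF])
    · obtain ⟨hcu_len, htu_len, hcu, htu⟩ := ih (t / 10) (Nat.div_lt_self (by omega) (by omega))
      simp only [dif_neg ht]
      rw [bloop_foldl, pair_foldl_upds]
      have hzg : ∀ j : Nat, (List.replicate M (0 : Int)).getD j 0 = 0 := by
        intro j
        simp [List.getD_eq_getElem?_getD, List.getElem?_replicate]
        split <;> rfl
      have hrt : t = 10 * (t / 10) + t % 10 := by omega
      have hr10 : t % 10 < 10 := by omega
      refine ⟨by simp [length_applyUpds], by simp [length_applyUpds], ?_, ?_⟩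
      · intro j hj
        rw [getD_applyUpds _ _ j (by simp [length_applyUpds]; omega), List.map_map,
          getD_applyUpds_range M _ _ j (by simp; omega), hzg j, zero_add, listSum_range]
        have e1 : ∀ s ∈ Finset.range M,
            (((if (pvTables M (t / 10)).1.getD s 0 = 0 then [] else
                (List.range 10).map (fun d => (s + d, (pvTables M (t / 10)).1.getD s 0))).map
              (fun u => if u.1 = j then u.2 else 0)).sum)
              = ∑ d ∈ Finset.range 10, if s + d = j then cntF (t / 10) s else 0 := by
          intro s hs
          rw [hcu s (Finset.mem_range.1 hs)]
          by_cases hc : cntF (t / 10) s = 0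
          · simp [hc]
          · simp only [hc, if_false]
            rw [List.map_map, ← listSum_range]
            rfl
        simp only [Function.comp_apply]
        rw [Finset.sum_congr rfl e1, arith_cl' M (t / 10) (t % 10) j hr10 hj, ← hrt]
      · intro j hj
        rw [getD_applyUpds _ _ j (by simp [length_applyUpds]; omega), List.map_map,
          getD_applyUpds_range M _ _ j (by simp; omega), hzg j, zero_add, listSum_range]
        have e1 : ∀ s ∈ Finset.range M,
            (((if (pvTables M (t / 10)).1.getD s 0 = 0 then [] else
                (List.range 10).map (fun d => (s + d,
                  10 * (pvTables M (t / 10)).2.getD s 0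
                    + (d : Int) * (pvTables M (t / 10)).1.getD s 0))).map
              (fun u => if u.1 = j then u.2 else 0)).sum)
              = ∑ d ∈ Finset.range 10,
                  if s + d = j then 10 * sumF (t / 10) s + (d : Int) * cntF (t / 10) s else 0 := by
          intro s hs
          rw [hcu s (Finset.mem_range.1 hs), htu s (Finset.mem_range.1 hs)]
          by_cases hc : cntF (t / 10) s = 0
          · simp [hc, cntF_zero_sumF_zero (t / 10) s hc]
          · simp only [hc, if_false]
            rw [List.map_map, ← listSum_range]
            rfl
        simp only [Function.comp_apply]
        rw [Finset.sum_congr rfl e1, arith_sl' M (t / 10) (t % 10) j hr10 hj, ← hrt]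

theorem alt_eq (n : Int) (h : 0 ≤ n) :
    sum_by_digit_sum_upto_alt n
      = (List.range (9 * (repN n.toNat).length + 1)).map (fun j => sumF (n.toNat + 1) j) := by
  simp only [sum_by_digit_sum_upto_alt]
  have hlen : (PySem.Int.toChars n).length = (repN n.toNat).length := by
    rw [← List.length_map (f := pvDigitInt), digits_eq_repN n h, List.length_map]
  have hL : (9 * PySem.Str.len (PySem.Int.toStr n) + 1).toNat = 9 * (repN n.toNat).length + 1 := by
    simp only [PySem.Str.len, PySem.Int.toList_toStr, hlen]
    omega
  have hm : (n + 1).toNat = n.toNat + 1 := by omega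
  rw [hL, hm]
  obtain ⟨hc_len, ht_len, hc, ht⟩ := tables_spec (9 * (repN n.toNat).length + 1) (n.toNat + 1)
  apply List.ext_getElem
  · simp [ht_len]
  · intro i h1 h2
    rw [← List.getD_eq_getElem _ 0 h1, List.getElem_map, List.getElem_range,
      ht i (by omega : i < 9 * (repN n.toNat).length + 1)]

/- ## A's result -/

theorem a_eq (n : Int) (h : 0 ≤ n) :
    sum_by_digit_sum_upto n
      = (List.range (9 * (repN n.toNat).length + 1)).map (fun j => sumF (n.toNat + 1) j) := by
  unfold sum_by_digit_sum_upto
  simp only [digits_eq_repN n h, List.length_map]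
  rw [List.foldl_map]
  have hinv := dp_fold (9 * (repN n.toNat).length) (repN n.toNat) (repN_lt n.toNat) 0 _
    (inv_init (9 * (repN n.toNat).length))
  rw [repN_val n.toNat 0, Nat.mul_zero, Nat.zero_add] at hinv
  obtain ⟨l1, l2, l3, l4, hT, hS, hC, hSl⟩ := hinv
  rw [PySem.List.pyRange_one,
    show (((9 * (repN n.toNat).length : Nat) : Int) + 1 - 0).toNat
      = 9 * (repN n.toNat).length + 1 from by omega, List.map_map]
  apply List.map_congr_left
  intro j hj
  have hjlt : j < 9 * (repN n.toNat).length + 1 := List.mem_range.1 hj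
  simp only [Function.comp_apply, zero_add, PySem.List.pyGetD_natCast]
  rw [hS j hjlt, hSl j hjlt]
  rw [show sumF (n.toNat + 1) j
      = sumF n.toNat j + (if pvDigitSum n.toNat = j then ((n.toNat : Nat) : Int) else 0) from
        Finset.sum_range_succ _ _]
  ring

-- ===== VERDICT (by name: the statement is the Claim_ definition above) =====
theorem sum_by_digit_sum_upto_spec : Claim_equal_sum_by_digit_sum_upto := by
  intro n _ hpre
  unfold Spec_sum_by_digit_sum_upto
  rw [a_eq n hpre, alt_eq n hpre]
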